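-- pv_equiv track=rewrite | github.com/JiHyeonMon/Algorithm | python/enterprise/godo5.py | solution
-- ===== SOURCE A (Python) =====
-- def solution(votes):
--     cnt = 0
--
--     #votes의 최댓값을 후보0의 값과 계속 비교하며 후보0을 가장 높은 값으로 만들어준다.
--     while max(votes)!=votes[0]:
--         i = votes.index(max(votes))
--         votes[i]-=1
--         votes[0]+=1
--         cnt+=1
--
--     #그러나 가장 높은 값이라도 같은 값이 있을 수 있다.
--     #후보0과 같은 값이 있다면(가장 높은 수), 후보0에게 한표 준다.
--     for i in range(1, len(votes)):
--         if votes[0]==votes[i]: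
--             votes[0]+=1
--             votes[i]-=1
--             cnt+=1
--             continue
--
--     return cnt
-- ===== SOURCE B (Python) =====
-- def solution(votes):
--     # Binary search on the number of moved votes c: c moves suffice iff the
--     # total excess of the other candidates above votes[0]+c-1 is at most c.
--     v0 = votes[0]
--     others = votes[1:]
--
--     def need(c):
--         # votes that must still be taken from others so all end <= v0+c-1
--         return sum(o - (v0 + c - 1) for o in others if o > v0 + c - 1)
--
--     lo, hi = 0, need(0)
--     while lo < hi:
--         mid = (lo + hi) // 2
--         if need(mid) <= mid:
--             hi = mid
--         else:
--             lo = mid + 1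
--     return lo
-- ===== Notes on version B (the rewrite author's own statement) =====
-- stated objective: faster
-- what changed: Replaces the vote-by-vote simulation (move one vote from the current maximum until candidate 0 leads, then a tie fix-up pass) by a binary search for the least number of moves c such that the total excess of the other candidates above candidate 0's count plus c-1 is at most c.
import Mathlib
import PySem

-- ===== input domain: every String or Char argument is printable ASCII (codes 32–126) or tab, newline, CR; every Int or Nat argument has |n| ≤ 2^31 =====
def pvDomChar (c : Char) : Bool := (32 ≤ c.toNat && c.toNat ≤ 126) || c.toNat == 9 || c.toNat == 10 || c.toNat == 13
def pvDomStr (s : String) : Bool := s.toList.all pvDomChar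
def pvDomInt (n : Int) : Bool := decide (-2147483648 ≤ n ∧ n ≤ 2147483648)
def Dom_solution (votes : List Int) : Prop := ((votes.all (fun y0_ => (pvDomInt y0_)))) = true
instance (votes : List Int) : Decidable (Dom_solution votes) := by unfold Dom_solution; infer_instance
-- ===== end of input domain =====

-- B replaces A's one-vote-at-a-time simulation by a binary search on the number of
-- moved votes (objective: faster, O(n log V) instead of O(n*V)).
-- A mutates its argument list in place; B does not — the equivalence proved here is
-- about the return value only.

-- ===== PORT A =====
-- A's while loop; the Nat fuel is a totality guard only (never exhausted for the
-- fuel solution passes, as proved below).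
def solA_loop : Nat → List Int × Int → List Int × Int
  | 0, s => s
  | fuel+1, (votes, cnt) =>
    match PySem.List.max? votes (fun y => y), PySem.List.pyGet? votes 0 with
    | some m, some v0 =>
      if m ≠ v0 then
        let i : Nat := (PySem.List.index? votes m).getD 0
        let votes1 := votes.set i (votes.getD i 0 - 1)
        let votes2 := votes1.set 0 (votes1.getD 0 0 + 1)
        solA_loop fuel (votes2, cnt + 1)
      else (votes, cnt)
    | _, _ => (votes, cnt)   -- Python raises here (max of / indexing an empty list): outside Pre_

-- A's final for-loop over range(1, len(votes))
def solA_tally (votes : List Int) (cnt : Int) : List Int × Int :=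
  (PySem.List.pyRange 1 (votes.length : Int)).foldl (fun s i =>
    if PySem.List.pyGetD s.1 0 0 = PySem.List.pyGetD s.1 i 0 then
      let vs1 := s.1.set 0 (PySem.List.pyGetD s.1 0 0 + 1)
      let vs2 := vs1.set i.toNat (PySem.List.pyGetD vs1 i 0 - 1)
      (vs2, s.2 + 1)
    else s) (votes, cnt)

def solution (votes : List Int) : Int :=
  let fuel := (votes.map (fun v => (v - PySem.List.pyGetD votes 0 0).toNat)).sum + 1
  let s := solA_loop fuel (votes, 0)
  (solA_tally s.1 s.2).2

-- ===== PORT B =====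
-- need(c) of Source B: votes still to be taken from the others so that all end ≤ v0+c-1
def solB_need (v0 : Int) (others : List Int) (c : Int) : Int :=
  (others.map (fun o => if v0 + c - 1 < o then o - (v0 + c - 1) else 0)).sum

-- the while-loop of Source B's binary search; fuel = initial (hi - lo).toNat is a
-- totality guard only
def solB_search (v0 : Int) (others : List Int) : Nat → Int → Int → Int
  | 0, lo, _ => lo
  | fuel+1, lo, hi =>
    if lo < hi then
      let mid := PySem.Int.floordiv (lo + hi) 2
      if solB_need v0 others mid ≤ mid then solB_search v0 others fuel lo mid
      else solB_search v0 others fuel (mid + 1) hi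
    else lo

def solution_alt (votes : List Int) : Int :=
  match votes with
  | [] => 0       -- Python raises IndexError here (indexing an empty list): outside Pre_
  | v0 :: others =>
    let hi := solB_need v0 others 0
    solB_search v0 others (hi - 0).toNat 0 hi

-- ===== PRECONDITION & SPEC =====
-- Pre_ excludes only the empty list, on which A raises (max of empty sequence).
def Pre_solution (votes : List Int) : Prop := votes ≠ []
instance (votes : List Int) : Decidable (Pre_solution votes) := by unfold Pre_solution; infer_instance
def pvWitness_solution : List Int := [3, 5, 2, 5]

def Spec_solution (votes : List Int) (out : Int) : Prop := out = solution_alt votes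
instance (votes : List Int) (out : Int) : Decidable (Spec_solution votes out) := by unfold Spec_solution; infer_instance

-- ===== CLAIM (what is proved, stated in full; the proofs are below) =====
def Claim_equal_solution : Prop := ∀ (votes : List Int), Dom_solution votes → Pre_solution votes → Spec_solution votes (solution votes)

-- ===== LEMMAS AND PROOFS =====

-- excess of l above the level T (solB_need v0 others c = exS (v0+c-1) others by rfl)
def exS (T : Int) (l : List Int) : Int := (l.map (fun o => if T < o then o - T else 0)).sum

-- measure of A's while loop
def muA (v0 : Int) (l : List Int) : Nat := (l.map (fun o => (o - v0).toNat)).sum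

theorem solB_need_eq_exS (v0 : Int) (others : List Int) (c : Int) :
    solB_need v0 others c = exS (v0 + c - 1) others := rfl

theorem exS_nonneg (T : Int) (l : List Int) : 0 ≤ exS T l := by
  induction l with
  | nil => simp [exS]
  | cons x t ih => simp only [exS, List.map_cons, List.sum_cons] at *; split_ifs with h <;> omega

theorem exS_antitone {T T' : Int} (l : List Int) (h : T ≤ T') : exS T' l ≤ exS T l := by
  induction l with
  | nil => simp [exS]
  | cons x t ih => simp only [exS, List.map_cons, List.sum_cons] at *; split_ifs with h1 h2 <;> omega

theorem exS_zero_of_le {T : Int} {l : List Int} (h : ∀ o ∈ l, o ≤ T) : exS T l = 0 := by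
  induction l with
  | nil => simp [exS]
  | cons x t ih =>
    have hx := h x (by simp)
    simp only [exS, List.map_cons, List.sum_cons] at *
    rw [if_neg (by omega), ih (fun o ho => h o (by simp [ho]))]
    simp

theorem term_le_exS {T x : Int} {l : List Int} (hx : x ∈ l) :
    (if T < x then x - T else 0) ≤ exS T l := by
  apply List.single_le_sum (l := l.map (fun o => if T < o then o - T else 0))
  · intro y hy
    obtain ⟨o, _, rfl⟩ := List.mem_map.1 hy
    split_ifs with h <;> omega
  · exact List.mem_map.2 ⟨x, hx, rfl⟩

-- replacing one element of a list in a mapped sum (additive form, any commutative monoid)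
theorem map_sum_set {M : Type} [AddCommMonoid M] (f : Int → M) (a : Int) :
    ∀ (l : List Int) (j : Nat), j < l.length →
      ((l.set j a).map f).sum + f (l.getD j 0) = (l.map f).sum + f a := by
  intro l
  induction l with
  | nil => intro j hj; simp at hj
  | cons x t ih =>
    intro j hj
    cases j with
    | zero => simp; abel
    | succ j =>
      simp only [List.set_cons_succ, List.map_cons, List.sum_cons, List.getD_cons_succ]
      have := ih j (by simpa using hj)
      rw [add_assoc, this, add_assoc]

-- shifting one step of A's while loop through the excess condition
theorem exS_step_iff {v0 m d : Int} {rest : List Int} {j : Nat}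
    (hj : j < rest.length) (hjv : rest.getD j 0 = m)
    (hall : ∀ o ∈ rest, o ≤ m) (hd : 0 ≤ d) :
    (exS (v0 + d) (rest.set j (m - 1)) ≤ d ↔ exS (v0 + d) rest ≤ d + 1) := by
  have hset := map_sum_set (fun o => if v0 + d < o then o - (v0 + d) else 0) (m - 1) rest j hj
  rw [hjv] at hset
  by_cases hm : v0 + d < m
  · have h1 : (if v0 + d < m then m - (v0 + d) else 0) = m - (v0 + d) := if_pos hm
    have h2 : (if v0 + d < m - 1 then m - 1 - (v0 + d) else 0) = m - (v0 + d) - 1 := by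
      split_ifs with h <;> omega
    have : exS (v0 + d) (rest.set j (m - 1)) + (m - (v0 + d)) = exS (v0 + d) rest + (m - (v0 + d) - 1) := by
      simpa [exS, h1, h2] using hset
    omega
  · have hz1 : exS (v0 + d) rest = 0 := exS_zero_of_le (fun o ho => le_trans (hall o ho) (by omega))
    have hz2 : exS (v0 + d) (rest.set j (m - 1)) = 0 := by
      apply exS_zero_of_le
      intro o ho
      rcases List.mem_or_eq_of_mem_set ho with h | h
      · exact le_trans (hall o h) (by omega)
      · omega
    rw [hz1, hz2]
    omega

-- the measure strictly decreases along A's while loop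
theorem muA_step_lt {v0 m : Int} {rest : List Int} {j : Nat}
    (hj : j < rest.length) (hjv : rest.getD j 0 = m) (hvm : v0 < m) :
    muA (v0 + 1) (rest.set j (m - 1)) < muA v0 rest := by
  have h1 : muA (v0 + 1) (rest.set j (m - 1)) ≤ muA v0 (rest.set j (m - 1)) := by
    unfold muA
    apply List.sum_le_sum
    intro x hx
    dsimp only
    omega
  have hset := map_sum_set (fun o => (o - v0).toNat) (m - 1) rest j hj
  rw [hjv] at hset
  have h2 : muA v0 (rest.set j (m - 1)) + (m - v0).toNat = muA v0 rest + (m - 1 - v0).toNat := by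
    simpa [muA] using hset
  have h3 : (m - v0).toNat = (m - 1 - v0).toNat + 1 := by omega
  omega

-- A's tally loop is a no-op where the head differs from every visited entry
theorem tally_noop (idxs : List Int) (vs : List Int) (cnt : Int)
    (h : ∀ i ∈ idxs, PySem.List.pyGetD vs 0 0 ≠ PySem.List.pyGetD vs i 0) :
    idxs.foldl (fun s i =>
      if PySem.List.pyGetD s.1 0 0 = PySem.List.pyGetD s.1 i 0 then
        let vs1 := s.1.set 0 (PySem.List.pyGetD s.1 0 0 + 1)
        let vs2 := vs1.set i.toNat (PySem.List.pyGetD vs1 i 0 - 1)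
        (vs2, s.2 + 1)
      else s) (vs, cnt) = (vs, cnt) := by
  induction idxs with
  | nil => rfl
  | cons i t ih =>
    have hne := h i (by simp)
    simp only [List.foldl_cons, if_neg hne]
    exact ih (fun k hk => h k (by simp [hk]))

theorem pyGetD_cons_pos (x : Int) (l : List Int) (i : Int) (d : Int) (h : 1 ≤ i) :
    PySem.List.pyGetD (x :: l) i d = l.getD (i.toNat - 1) d := by
  rw [PySem.List.pyGetD_of_nonneg _ _ (by omega : (0:Int) ≤ i)]
  obtain ⟨n, hn⟩ : ∃ n, i.toNat = n + 1 := ⟨i.toNat - 1, by omega⟩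
  rw [hn]
  simp

-- A's tally loop counts exactly one extra move iff some other candidate ties the head
theorem tally_go (idxs : List Int) (v0 : Int) (rest : List Int) (cnt : Int)
    (hvalid : ∀ i ∈ idxs, 1 ≤ i ∧ i < ((v0 :: rest : List Int).length : Int))
    (hle : ∀ o ∈ rest, o ≤ v0) :
    (idxs.foldl (fun s i =>
      if PySem.List.pyGetD s.1 0 0 = PySem.List.pyGetD s.1 i 0 then
        let vs1 := s.1.set 0 (PySem.List.pyGetD s.1 0 0 + 1)
        let vs2 := vs1.set i.toNat (PySem.List.pyGetD vs1 i 0 - 1)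
        (vs2, s.2 + 1)
      else s) (v0 :: rest, cnt)).2
    = cnt + (if ∃ i ∈ idxs, PySem.List.pyGetD (v0 :: rest) i 0 = v0 then 1 else 0) := by
  induction idxs with
  | nil => simp
  | cons i t ih =>
    obtain ⟨hi1, hi2⟩ := hvalid i (by simp)
    have hlen : i.toNat - 1 < rest.length := by
      simp only [List.length_cons] at hi2; omega
    have hget0 : PySem.List.pyGetD ((v0 : Int) :: rest) 0 0 = v0 := by
      rw [PySem.List.pyGetD_of_nonneg _ _ le_rfl]; rfl
    have hgeti : PySem.List.pyGetD ((v0 : Int) :: rest) i 0 = rest.getD (i.toNat - 1) 0 :=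
      pyGetD_cons_pos _ _ _ _ hi1
    simp only [List.foldl_cons]
    by_cases hhit : PySem.List.pyGetD ((v0 : Int) :: rest) 0 0 = PySem.List.pyGetD ((v0 : Int) :: rest) i 0
    · rw [if_pos hhit]
      have hv1 : ((v0 : Int) :: rest).set 0 (PySem.List.pyGetD ((v0 : Int) :: rest) 0 0 + 1) = (v0 + 1) :: rest := by
        rw [hget0]; rfl
      have hrv : rest.getD (i.toNat - 1) 0 = v0 := by
        rw [← hgeti, ← hhit, hget0]
      have hg1 : PySem.List.pyGetD ((v0 + 1) :: rest) i 0 = v0 := by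
        rw [pyGetD_cons_pos _ _ _ _ hi1, hrv]
      have hv2 : ((v0 + 1) :: rest).set i.toNat (PySem.List.pyGetD ((v0 + 1) :: rest) i 0 - 1)
          = (v0 + 1) :: rest.set (i.toNat - 1) (v0 - 1) := by
        rw [hg1]
        obtain ⟨n, hn⟩ : ∃ n, i.toNat = n + 1 := ⟨i.toNat - 1, by omega⟩
        rw [hn, List.set_cons_succ]
        simp
      rw [hv1, hv2]
      have hnoop := tally_noop t ((v0 + 1) :: rest.set (i.toNat - 1) (v0 - 1)) (cnt + 1) (by
        intro k hk
        obtain ⟨hk1, hk2⟩ := hvalid k (by simp [hk])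
        have hg0 : PySem.List.pyGetD ((v0 + 1) :: rest.set (i.toNat - 1) (v0 - 1)) 0 0 = v0 + 1 := by
          rw [PySem.List.pyGetD_of_nonneg _ _ le_rfl]; rfl
        have hklen : k.toNat - 1 < (rest.set (i.toNat - 1) (v0 - 1)).length := by
          simp only [List.length_set]
          simp only [List.length_cons] at hk2
          omega
        have hgk : PySem.List.pyGetD ((v0 + 1) :: rest.set (i.toNat - 1) (v0 - 1)) k 0
            = (rest.set (i.toNat - 1) (v0 - 1)).getD (k.toNat - 1) 0 :=
          pyGetD_cons_pos _ _ _ _ hk1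
        rw [hg0, hgk, List.getD_eq_getElem _ _ hklen]
        have hmem := List.mem_or_eq_of_mem_set (List.getElem_mem hklen)
        rcases hmem with hmem | hmem
        · have := hle _ hmem
          omega
        · omega)
      rw [hnoop]
      have hex : ∃ k ∈ (i :: t), PySem.List.pyGetD ((v0 : Int) :: rest) k 0 = v0 := ⟨i, by simp, by rw [← hhit, hget0]⟩
      rw [if_pos hex]
    · rw [if_neg hhit]
      rw [ih (fun k hk => hvalid k (by simp [hk])) ]
      have hxne : ¬ (PySem.List.pyGetD ((v0 : Int) :: rest) i 0 = v0) := fun h => hhit (by rw [hget0, h])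
      congr 1
      by_cases hex : ∃ k ∈ t, PySem.List.pyGetD ((v0 : Int) :: rest) k 0 = v0
      · rw [if_pos hex, if_pos (by obtain ⟨k, hk, hkk⟩ := hex; exact ⟨k, by simp [hk], hkk⟩)]
      · rw [if_neg hex, if_neg (by
          rintro ⟨k, hk, hkk⟩
          rcases List.mem_cons.1 hk with rfl | hk
          · exact hxne hkk
          · exact hex ⟨k, hk, hkk⟩)]

theorem idx_cons_spec {v0 m : Int} {rest : List Int} (hne : m ≠ v0) (hmem : m ∈ rest) :
    ∃ j : Nat, (PySem.List.index? (v0 :: rest) m).getD 0 = j + 1 ∧ j < rest.length ∧ rest.getD j 0 = m := by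
  have hsome : (List.idxOf? m rest).isSome := List.isSome_idxOf?.mpr hmem
  obtain ⟨j, hj⟩ := Option.isSome_iff_exists.1 hsome
  obtain ⟨hlt, hpj, -⟩ := List.findIdx?_eq_some_iff_getElem.1 hj
  refine ⟨j, ?_, hlt, ?_⟩
  · show (List.idxOf? m (v0 :: rest)).getD 0 = (j + 1 : Nat)
    unfold List.idxOf? at hj ⊢
    rw [List.findIdx?_cons, if_neg (by simp [Ne.symm hne]), hj]
    rfl
  · rw [List.getD_eq_getElem _ _ hlt]
    exact eq_of_beq hpj

theorem tie_exists (v0 : Int) (rest : List Int) :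
    (∃ i ∈ PySem.List.pyRange 1 (((v0 :: rest : List Int).length : Int)),
        PySem.List.pyGetD (v0 :: rest) i 0 = v0) ↔ v0 ∈ rest := by
  constructor
  · rintro ⟨i, hi, hgi⟩
    obtain ⟨hi1, hi2⟩ := PySem.List.mem_pyRange_one.1 hi
    simp only [List.length_cons] at hi2
    have hlt : i.toNat - 1 < rest.length := by omega
    rw [pyGetD_cons_pos _ _ _ _ hi1, List.getD_eq_getElem _ _ hlt] at hgi
    exact hgi ▸ List.getElem_mem hlt
  · intro hmem
    obtain ⟨k, hk, hkv⟩ := List.mem_iff_getElem.1 hmem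
    refine ⟨(k : Int) + 1, PySem.List.mem_pyRange_one.2 (by simp only [List.length_cons]; omega), ?_⟩
    rw [pyGetD_cons_pos _ _ _ _ (by omega)]
    have : ((k : Int) + 1).toNat - 1 = k := by omega
    rw [this, List.getD_eq_getElem _ _ hk, hkv]

-- the tally loop rephrased through tally_go and tie_exists
theorem tally_char (v0 : Int) (rest : List Int) (cnt : Int) (hle : ∀ o ∈ rest, o ≤ v0) :
    (solA_tally (v0 :: rest) cnt).2 = cnt + (if v0 ∈ rest then 1 else 0) := by
  unfold solA_tally
  rw [tally_go _ v0 rest cnt (fun i hi => ?_) hle]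
  · rw [if_congr (tie_exists v0 rest) rfl rfl]
  · exact PySem.List.mem_pyRange_one.1 hi

-- main characterisation of A: the returned count is the least c ≥ 0 with exS (v0+c-1) rest ≤ c
theorem solA_main : ∀ (fuel : Nat) (v0 : Int) (rest : List Int) (cnt : Int),
    muA v0 rest < fuel →
    ∃ c : Int,
      (solA_tally (solA_loop fuel (v0 :: rest, cnt)).1 (solA_loop fuel (v0 :: rest, cnt)).2).2
        = cnt + c ∧
      0 ≤ c ∧ exS (v0 + c - 1) rest ≤ c ∧
      ∀ d : Int, 0 ≤ d → d < c → ¬ (exS (v0 + d - 1) rest ≤ d) := by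
  intro fuel
  induction fuel with
  | zero => intro v0 rest cnt hmu; omega
  | succ f ih =>
    intro v0 rest cnt hmu
    have hmax : PySem.List.max? ((v0 : Int) :: rest) (fun y => y) = some (rest.foldl max v0) :=
      PySem.List.max?_id_cons v0 rest
    have hget : PySem.List.pyGet? ((v0 : Int) :: rest) 0 = some v0 := by
      simp [PySem.List.pyGet?, PySem.List.pyIdx?]
    have hloop : solA_loop (f + 1) (v0 :: rest, cnt)
        = (if rest.foldl max v0 ≠ v0 then
            (let i : Nat := (PySem.List.index? (v0 :: rest) (rest.foldl max v0)).getD 0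
             let votes1 := (v0 :: rest).set i ((v0 :: rest).getD i 0 - 1)
             let votes2 := votes1.set 0 (votes1.getD 0 0 + 1)
             solA_loop f (votes2, cnt + 1))
          else (v0 :: rest, cnt)) := by
      simp only [solA_loop, hmax, hget]
    have hallm : ∀ o ∈ rest, o ≤ rest.foldl max v0 := (PySem.List.le_foldl_max rest v0).2
    have hv0m : v0 ≤ rest.foldl max v0 := (PySem.List.le_foldl_max rest v0).1
    by_cases hm : rest.foldl max v0 = v0
    · rw [hloop, if_neg (by simp [hm])]
      have hle : ∀ o ∈ rest, o ≤ v0 := fun o ho => hm ▸ hallm o ho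
      rw [tally_char v0 rest cnt hle]
      by_cases htie : v0 ∈ rest
      · refine ⟨1, by rw [if_pos htie], by norm_num, ?_, ?_⟩
        · have : exS (v0 + 1 - 1) rest = 0 := exS_zero_of_le (by simpa using hle)
          omega
        · intro d hd hdlt hcond
          have hd0 : d = 0 := by omega
          subst hd0
          have := term_le_exS (T := v0 + 0 - 1) htie
          rw [if_pos (by omega)] at this
          omega
      · refine ⟨0, by rw [if_neg htie], le_rfl, ?_, by omega⟩
        have : exS (v0 + 0 - 1) rest = 0 := exS_zero_of_le (by
          intro o ho
          have h1 := hle o ho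
          have h2 : o ≠ v0 := fun h => htie (h ▸ ho)
          omega)
        omega
    · rw [hloop, if_pos hm]
      have hvlt : v0 < rest.foldl max v0 := lt_of_le_of_ne hv0m (Ne.symm hm)
      have hmem : rest.foldl max v0 ∈ rest := by
        rcases PySem.List.foldl_max_mem rest v0 with h | h
        · exact absurd h hm
        · exact h
      obtain ⟨j, hidx, hj, hjv⟩ := idx_cons_spec hm hmem
      have hv1 : ((v0 : Int) :: rest).set ((PySem.List.index? (v0 :: rest) (rest.foldl max v0)).getD 0)
            (((v0 : Int) :: rest).getD ((PySem.List.index? (v0 :: rest) (rest.foldl max v0)).getD 0) 0 - 1)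
          = v0 :: rest.set j (rest.foldl max v0 - 1) := by
        rw [hidx, List.set_cons_succ, List.getD_cons_succ, hjv]
      simp only [hv1, List.set_cons_zero, List.getD_cons_zero]
      have hmu' : muA (v0 + 1) (rest.set j (rest.foldl max v0 - 1)) < f :=
        lt_of_lt_of_le (muA_step_lt hj hjv hvlt) (by omega)
      obtain ⟨c', hc', hc'0, hcond', hmin'⟩ := ih (v0 + 1) (rest.set j (rest.foldl max v0 - 1)) (cnt + 1) hmu'
      refine ⟨c' + 1, by rw [hc']; ring, by omega, ?_, ?_⟩
      · have := (exS_step_iff (d := c') hj hjv hallm hc'0).1 (by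
          rw [show v0 + c' = v0 + 1 + c' - 1 by ring]
          exact hcond')
        rw [show v0 + (c' + 1) - 1 = v0 + c' by ring]
        omega
      · intro d hd hdlt hcond
        by_cases hd0 : d = 0
        · subst hd0
          have ht := term_le_exS (T := v0 + 0 - 1) hmem
          rw [if_pos (by omega)] at ht
          omega
        · have hd' : 0 ≤ d - 1 ∧ d - 1 < c' := by omega
          apply hmin' (d - 1) hd'.1 hd'.2
          rw [show v0 + 1 + (d - 1) - 1 = v0 + (d - 1) by ring]
          exact (exS_step_iff (d := d - 1) hj hjv hallm hd'.1).2 (by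
            rw [show v0 + (d - 1) = v0 + d - 1 by ring]
            omega)

-- B's binary search returns the least c ≥ lo satisfying the condition
theorem solB_search_spec (v0 : Int) (others : List Int) :
    ∀ (fuel : Nat) (lo hi : Int), 0 ≤ lo → lo ≤ hi → (hi - lo).toNat ≤ fuel →
    solB_need v0 others hi ≤ hi →
    (∀ d : Int, 0 ≤ d → d < lo → ¬ (solB_need v0 others d ≤ d)) →
    (0 ≤ solB_search v0 others fuel lo hi ∧
     solB_need v0 others (solB_search v0 others fuel lo hi) ≤ solB_search v0 others fuel lo hi ∧
     ∀ d : Int, 0 ≤ d → d < solB_search v0 others fuel lo hi → ¬ (solB_need v0 others d ≤ d)) := by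
  intro fuel
  induction fuel with
  | zero =>
    intro lo hi hlo hlohi hfuel hhi hmin
    have heq : lo = hi := by omega
    subst heq
    exact ⟨hlo, hhi, hmin⟩
  | succ f ih =>
    intro lo hi hlo hlohi hfuel hhi hmin
    simp only [solB_search]
    by_cases h : lo < hi
    · rw [if_pos h]
      obtain ⟨hm1, hm2⟩ := PySem.Int.floordiv_two_mid_bounds (le_of_lt h)
      have hmidlt : PySem.Int.floordiv (lo + hi) 2 < hi :=
        (PySem.Int.floordiv_lt_iff_lt_mul (by norm_num)).2 (by omega)
      by_cases hc : solB_need v0 others (PySem.Int.floordiv (lo + hi) 2) ≤ PySem.Int.floordiv (lo + hi) 2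
      · rw [if_pos hc]
        exact ih lo _ hlo hm1 (by omega) hc hmin
      · rw [if_neg hc]
        apply ih _ hi (by omega) (by omega) (by omega) hhi
        intro d hd hdlt
        by_cases hdlo : d < lo
        · exact hmin d hd hdlo
        · intro hcond
          apply hc
          calc solB_need v0 others (PySem.Int.floordiv (lo + hi) 2)
              ≤ solB_need v0 others d := by
                rw [solB_need_eq_exS, solB_need_eq_exS]
                exact exS_antitone _ (by omega)
            _ ≤ d := hcond
            _ ≤ PySem.Int.floordiv (lo + hi) 2 := by omega
    · rw [if_neg h]
      have heq : lo = hi := by omega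
      exact ⟨hlo, heq ▸ hhi, hmin⟩

theorem solB_main (v0 : Int) (rest : List Int) :
    0 ≤ solution_alt (v0 :: rest) ∧
    exS (v0 + solution_alt (v0 :: rest) - 1) rest ≤ solution_alt (v0 :: rest) ∧
    ∀ d : Int, 0 ≤ d → d < solution_alt (v0 :: rest) → ¬ (exS (v0 + d - 1) rest ≤ d) := by
  have hhi0 : 0 ≤ solB_need v0 rest 0 := by
    rw [solB_need_eq_exS]; exact exS_nonneg _ _
  have hcondhi : solB_need v0 rest (solB_need v0 rest 0) ≤ solB_need v0 rest 0 := by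
    conv_rhs => rw [solB_need_eq_exS]
    rw [solB_need_eq_exS]
    exact exS_antitone (T := v0 + 0 - 1) (T' := v0 + solB_need v0 rest 0 - 1) rest (by omega)
  have hspec := solB_search_spec v0 rest (solB_need v0 rest 0 - 0).toNat 0 (solB_need v0 rest 0)
    le_rfl hhi0 le_rfl hcondhi (fun d hd hdlt => absurd hdlt (by omega))
  have halt : solution_alt (v0 :: rest)
      = solB_search v0 rest (solB_need v0 rest 0 - 0).toNat 0 (solB_need v0 rest 0) := rfl
  rw [halt]
  obtain ⟨h1, h2, h3⟩ := hspec
  refine ⟨h1, ?_, fun d hd hdlt => ?_⟩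
  · rw [solB_need_eq_exS] at h2; exact h2
  · intro hcond
    exact h3 d hd hdlt (by rw [solB_need_eq_exS]; exact hcond)

-- ===== VERDICT (by name: the statement is the Claim_ definition above) =====
theorem solution_spec : Claim_equal_solution := by
  intro votes _ hpre
  unfold Spec_solution
  match votes with
  | [] => exact absurd rfl hpre
  | v0 :: rest =>
    have hfuel : muA v0 rest < (((v0 :: rest).map (fun v => (v - PySem.List.pyGetD (v0 :: rest) 0 0).toNat)).sum + 1) := by
      have hg : PySem.List.pyGetD ((v0 : Int) :: rest) 0 0 = v0 := by
        rw [PySem.List.pyGetD_of_nonneg _ _ le_rfl]; rfl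
      rw [hg]
      simp only [List.map_cons, List.sum_cons, muA]
      omega
    have hA := solA_main ((((v0 :: rest).map (fun v => (v - PySem.List.pyGetD (v0 :: rest) 0 0).toNat)).sum + 1)) v0 rest 0 hfuel
    obtain ⟨c, hc, hc0, hcond, hmin⟩ := hA
    obtain ⟨hb0, hbcond, hbmin⟩ := solB_main v0 rest
    have h1 : solution (v0 :: rest) = c := by
      simp only [solution]
      rw [hc]
      ring
    rw [h1]
    by_contra hne
    rcases lt_or_gt_of_ne hne with h | h
    · exact hbmin c hc0 h hcond
    · exact hmin _ hb0 h hbcond
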